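-- pv_equiv track=rewrite | github.com/UroBs17/Programacion-competitiva | programacion competitiva/ecigma/uva ejercicios/sss.py | maypaim
-- ===== SOURCE A (Python) =====
-- def maypaim(lista, y):
--     for i in range(1,len(lista)):
--         for j in range(len(lista)-i):
--             if lista[j] < lista[j+1] and lista[j]%y == lista[j+1]%y and lista[j]%2 == 1 and lista[j+1]%2==1 :
--                 lista[j],lista[j+1]=lista[j+1],lista[j]
--             elif lista[j] > lista[j+1] and lista[j]%y == lista[j+1]%y and lista[j]%2 == 0 and lista[j+1]%2==0:
--                 lista[j],lista[j+1]=lista[j+1],lista[j]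
--     return lista
-- ===== SOURCE B (Python) =====
-- def maypaim(lista, y):
--     # One pass: split into maximal runs of equal (x % y, x % 2); sort each run
--     # (descending for odd runs, ascending for even runs). Return-value equivalent
--     # to A; unlike A it does not mutate lista in place.
--     out = []
--     i, n = 0, len(lista)
--     while i < n:
--         k = (lista[i] % y, lista[i] % 2)
--         j = i + 1
--         while j < n and (lista[j] % y, lista[j] % 2) == k:
--             j += 1
--         out += sorted(lista[i:j], reverse=lista[i] % 2 == 1)
--         i = j
--     return out
-- ===== Notes on version B (the rewrite author's own statement) =====
-- stated objective: faster
-- what changed: A's restricted O(n^2) bubble sort (adjacent swaps only between neighbours with equal (x%y, x%2)) is replaced by one linear scan that splits the list into maximal runs of equal (x%y, x%2) and sorts each run once (descending for odd runs, ascending for even runs).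
-- outside the precondition, e.g. on maypaim([3], 0): A returns [3], B raises ZeroDivisionError
import Mathlib
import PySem

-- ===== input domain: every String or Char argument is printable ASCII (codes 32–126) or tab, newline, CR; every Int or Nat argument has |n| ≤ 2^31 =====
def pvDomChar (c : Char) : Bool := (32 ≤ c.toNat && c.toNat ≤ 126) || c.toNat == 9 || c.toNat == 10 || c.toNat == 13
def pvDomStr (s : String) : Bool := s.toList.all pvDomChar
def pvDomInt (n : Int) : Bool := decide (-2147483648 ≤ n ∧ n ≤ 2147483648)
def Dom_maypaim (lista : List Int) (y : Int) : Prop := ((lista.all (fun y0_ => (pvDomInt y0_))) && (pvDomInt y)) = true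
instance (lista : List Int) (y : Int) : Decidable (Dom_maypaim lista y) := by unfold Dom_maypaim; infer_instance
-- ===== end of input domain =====

-- B replaces A's restricted O(n^2) bubble sort by one linear split into maximal runs of
-- equal (x%y, x%2), sorting each run once (odd runs descending, even runs ascending).
-- A mutates lista in place and returns it; B builds a fresh list: the equivalence proved
-- here is about the RETURN value only.

-- ===== PORT A =====
def pvStep (y : Int) (l : List Int) (j : Int) : List Int :=
  let a := PySem.List.pyGetD l j 0
  let b := PySem.List.pyGetD l (j + 1) 0
  if a < b ∧ PySem.Int.mod a y = PySem.Int.mod b y ∧ PySem.Int.mod a 2 = 1 ∧ PySem.Int.mod b 2 = 1 then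
    PySem.List.pySetD (PySem.List.pySetD l j b) (j + 1) a
  else if a > b ∧ PySem.Int.mod a y = PySem.Int.mod b y ∧ PySem.Int.mod a 2 = 0 ∧ PySem.Int.mod b 2 = 0 then
    PySem.List.pySetD (PySem.List.pySetD l j b) (j + 1) a
  else l

def maypaim (lista : List Int) (y : Int) : List Int :=
  (PySem.List.pyRange 1 (lista.length : Int) 1).foldl
    (fun l i =>
      (PySem.List.pyRange 0 ((lista.length : Int) - i) 1).foldl (fun l' j => pvStep y l' j) l)
    lista

-- ===== PORT B =====
def pvKey (y x : Int) : Int × Int := (PySem.Int.mod x y, PySem.Int.mod x 2)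

def maypaim_alt (lista : List Int) (y : Int) : List Int :=
  match lista with
  | [] => []
  | x :: xs =>
    let run := x :: xs.takeWhile (fun z => decide (pvKey y z = pvKey y x))
    let rest := xs.dropWhile (fun z => decide (pvKey y z = pvKey y x))
    PySem.List.sorted run (fun v => v) (decide (PySem.Int.mod x 2 = 1)) ++ maypaim_alt rest y
termination_by lista.length
decreasing_by
  simp only [List.length_cons]
  exact Nat.lt_succ_of_le (List.length_dropWhile_le _ xs)

-- ===== PRECONDITION & SPEC =====
-- Pre_ excludes y = 0: there Python A raises ZeroDivisionError as soon as it compares two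
-- distinct adjacent elements, and returns only accidentally (length ≤ 1, or every adjacent
-- comparison short-circuits on equality before evaluating '% y'); B's modulus raises on any
-- non-empty list with y = 0.
def Pre_maypaim (lista : List Int) (y : Int) : Prop := y ≠ 0
instance (lista : List Int) (y : Int) : Decidable (Pre_maypaim lista y) := by unfold Pre_maypaim; infer_instance
def pvWitness_maypaim : List Int × Int := ([3, 1, 4, 2, 6], 2)

def Spec_maypaim (lista : List Int) (y : Int) (out : List Int) : Prop := out = maypaim_alt lista y
instance (lista : List Int) (y : Int) (out : List Int) : Decidable (Spec_maypaim lista y out) := by unfold Spec_maypaim; infer_instance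

-- ===== CLAIM (what is proved, stated in full; the proofs are below) =====
def Claim_equal_maypaim : Prop := ∀ (lista : List Int) (y : Int), Dom_maypaim lista y → Pre_maypaim lista y → Spec_maypaim lista y (maypaim lista y)

-- ===== LEMMAS AND PROOFS =====

-- One truncated bubble pass over the first k adjacent pairs, as structural recursion.
def tpass (y : Int) : Nat → List Int → List Int
  | 0, l => l
  | _ + 1, [] => []
  | _ + 1, [a] => [a]
  | k + 1, a :: b :: t =>
    if a < b ∧ PySem.Int.mod a y = PySem.Int.mod b y ∧ PySem.Int.mod a 2 = 1 ∧ PySem.Int.mod b 2 = 1 then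
      b :: tpass y k (a :: t)
    else if a > b ∧ PySem.Int.mod a y = PySem.Int.mod b y ∧ PySem.Int.mod a 2 = 0 ∧ PySem.Int.mod b 2 = 0 then
      b :: tpass y k (a :: t)
    else a :: tpass y k (b :: t)

-- Passes of widths m, m-1, ..., 1 (A's outer loop).
def sweep (y : Int) : Nat → List Int → List Int
  | 0, l => l
  | m + 1, l => sweep y m (tpass y (m + 1) l)

-- "x may stand before c, c being last, in a sorted run of c's parity"
def pvExt (c x : Int) : Prop := if PySem.Int.mod c 2 = 1 then c ≤ x else x ≤ c

theorem length_tpass (y : Int) : ∀ (k : Nat) (l : List Int), (tpass y k l).length = l.length := by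
  intro k
  induction k with
  | zero => intro l; rfl
  | succ k ih =>
    intro l
    match l with
    | [] => rfl
    | [a] => rfl
    | a :: b :: t =>
      simp only [tpass]
      split_ifs <;> simp [ih]

theorem tpass_perm (y : Int) : ∀ (k : Nat) (l : List Int), (tpass y k l).Perm l := by
  intro k
  induction k with
  | zero => intro l; exact List.Perm.refl l
  | succ k ih =>
    intro l
    match l with
    | [] => exact List.Perm.refl _
    | [a] => exact List.Perm.refl _
    | a :: b :: t =>
      simp only [tpass]
      split_ifs
      · exact ((ih (a :: t)).cons b).trans (List.Perm.swap a b t)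
      · exact ((ih (a :: t)).cons b).trans (List.Perm.swap a b t)
      · exact (ih (b :: t)).cons a

theorem tpass_append (y : Int) : ∀ (k : Nat) (u v : List Int), k + 1 ≤ u.length →
    tpass y k (u ++ v) = tpass y k u ++ v := by
  intro k
  induction k with
  | zero => intro u v _; rfl
  | succ k ih =>
    intro u v h
    match u with
    | [] => simp at h
    | [a] => simp at h
    | a :: b :: t =>
      simp only [List.cons_append, tpass]
      split_ifs
      · rw [show a :: (t ++ v) = (a :: t) ++ v by simp, ih (a :: t) v (by simp at h ⊢; omega)]; rfl
      · rw [show a :: (t ++ v) = (a :: t) ++ v by simp, ih (a :: t) v (by simp at h ⊢; omega)]; rfl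
      · rw [show b :: (t ++ v) = (b :: t) ++ v by simp, ih (b :: t) v (by simp at h ⊢; omega)]; rfl

theorem sweep_append (y : Int) : ∀ (m : Nat) (u : List Int) (c : Int), m + 1 ≤ u.length →
    sweep y m (u ++ [c]) = sweep y m u ++ [c] := by
  intro m
  induction m with
  | zero => intro u c _; rfl
  | succ m ih =>
    intro u c h
    simp only [sweep]
    rw [tpass_append y (m + 1) u [c] (by omega), ih _ c (by rw [length_tpass]; omega)]

-- ---- indexing helpers for the bridge ----
theorem pyGetD_append_cons (p : List Int) (x : Int) (r : List Int) (d : Int) :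
    PySem.List.pyGetD (p ++ x :: r) (p.length : Int) d = x := by
  rw [PySem.List.pyGetD_natCast]
  simp [List.getD_eq_getElem?_getD]

theorem pySetD_append_cons (p : List Int) (x : Int) (r : List Int) (v : Int) :
    PySem.List.pySetD (p ++ x :: r) (p.length : Int) v = p ++ v :: r := by
  rw [PySem.List.pySetD_natCast]
  rw [List.set_append_right _ _ (le_refl _)]
  simp

theorem step_spec (y : Int) (p : List Int) (a b : Int) (t : List Int) :
    pvStep y (p ++ a :: b :: t) (p.length : Int) =
      if a < b ∧ PySem.Int.mod a y = PySem.Int.mod b y ∧ PySem.Int.mod a 2 = 1 ∧ PySem.Int.mod b 2 = 1 then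
        p ++ b :: a :: t
      else if a > b ∧ PySem.Int.mod a y = PySem.Int.mod b y ∧ PySem.Int.mod a 2 = 0 ∧ PySem.Int.mod b 2 = 0 then
        p ++ b :: a :: t
      else p ++ a :: b :: t := by
  have hga : PySem.List.pyGetD (p ++ a :: b :: t) (p.length : Int) 0 = a := pyGetD_append_cons p a _ 0
  have hgb : PySem.List.pyGetD (p ++ a :: b :: t) ((p.length : Int) + 1) 0 = b := by
    have h1 : (p.length : Int) + 1 = ((p ++ [a]).length : Int) := by simp
    rw [h1, show p ++ a :: b :: t = (p ++ [a]) ++ b :: t by simp]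
    exact pyGetD_append_cons (p ++ [a]) b t 0
  have hsa : PySem.List.pySetD (p ++ a :: b :: t) (p.length : Int) b = p ++ b :: b :: t :=
    pySetD_append_cons p a (b :: t) b
  have hsb : PySem.List.pySetD (p ++ b :: b :: t) ((p.length : Int) + 1) a = p ++ b :: a :: t := by
    have h1 : (p.length : Int) + 1 = ((p ++ [b]).length : Int) := by simp
    rw [h1, show p ++ b :: b :: t = (p ++ [b]) ++ b :: t by simp]
    rw [pySetD_append_cons (p ++ [b]) b t a]
    simp
  simp only [pvStep, hga, hgb]
  split_ifs <;> simp_all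

theorem inner_bridge (y : Int) : ∀ (k : Nat) (p l : List Int), k + 1 ≤ l.length →
    (PySem.List.pyRange (p.length : Int) ((p.length : Int) + k) 1).foldl (fun l' j => pvStep y l' j) (p ++ l)
      = p ++ tpass y k l := by
  intro k
  induction k with
  | zero =>
    intro p l _
    simp only [Nat.cast_zero, add_zero]
    rw [PySem.List.pyRange_one_eq_nil (le_refl _)]
    rfl
  | succ k ih =>
    intro p l h
    match l, h with
    | a :: b :: t, h =>
      rw [PySem.List.pyRange_one_cons (by push_cast; omega)]
      simp only [List.foldl_cons]
      rw [step_spec y p a b t]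
      have harith : (p.length : Int) + ((k : Nat) + 1 : Nat) = ((p.length : Int) + 1) + (k : Nat) := by push_cast; ring
      split_ifs with h1 h2
      · rw [harith, show ((p.length : Int) + 1) = (((p ++ [b]).length : Int)) by simp,
            show p ++ b :: a :: t = (p ++ [b]) ++ a :: t by simp,
            ih (p ++ [b]) (a :: t) (by simp at h ⊢; omega)]
        simp only [tpass, if_pos h1]
        simp
      · rw [harith, show ((p.length : Int) + 1) = (((p ++ [b]).length : Int)) by simp,
            show p ++ b :: a :: t = (p ++ [b]) ++ a :: t by simp,
            ih (p ++ [b]) (a :: t) (by simp at h ⊢; omega)]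
        simp only [tpass, if_neg h1, if_pos h2]
        simp
      · rw [harith, show ((p.length : Int) + 1) = (((p ++ [a]).length : Int)) by simp,
            show p ++ a :: b :: t = (p ++ [a]) ++ b :: t by simp,
            ih (p ++ [a]) (b :: t) (by simp at h ⊢; omega)]
        simp only [tpass, if_neg h1, if_neg h2]
        simp
    | [a], h => simp at h
    | [], h => simp at h

theorem outer_bridge (lista : List Int) (y : Int) :
    ∀ (r : Nat) (l : List Int), l.length = lista.length → r + 1 ≤ lista.length →
    (PySem.List.pyRange ((lista.length : Int) - r) (lista.length : Int) 1).foldl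
      (fun l' i => (PySem.List.pyRange 0 ((lista.length : Int) - i) 1).foldl (fun l'' j => pvStep y l'' j) l') l
      = sweep y r l := by
  intro r
  induction r with
  | zero =>
    intro l _ _
    simp only [Nat.cast_zero, sub_zero]
    rw [PySem.List.pyRange_one_eq_nil (le_refl _)]
    rfl
  | succ r ih =>
    intro l hl hr
    rw [PySem.List.pyRange_one_cons (by push_cast; omega)]
    simp only [List.foldl_cons]
    have hinner :
        (PySem.List.pyRange 0 ((lista.length : Int) - ((lista.length : Int) - ((r : Nat) + 1 : Nat))) 1).foldl
          (fun l'' j => pvStep y l'' j) l = tpass y (r + 1) l := by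
      have h2 : ((lista.length : Int) - ((lista.length : Int) - ((r : Nat) + 1 : Nat))) = (((r + 1 : Nat)) : Int) := by
        push_cast; ring
      rw [h2]
      have h3 := inner_bridge y (r + 1) [] l (by omega)
      simpa using h3
    rw [hinner]
    have harith : (lista.length : Int) - ((r : Nat) + 1 : Nat) + 1 = (lista.length : Int) - (r : Nat) := by
      push_cast; ring
    rw [harith, ih (tpass y (r + 1) l) (by rw [length_tpass]; exact hl) (by omega)]
    rfl

theorem maypaim_eq_sweep (lista : List Int) (y : Int) :
    maypaim lista y = sweep y (lista.length - 1) lista := by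
  match h : lista.length with
  | 0 =>
    have h0 : lista = [] := List.length_eq_zero_iff.mp h
    subst h0
    rfl
  | n + 1 =>
    unfold maypaim
    have h1 : (1 : Int) = (lista.length : Int) - ((n : Nat) : Int) := by rw [h]; push_cast; ring
    rw [h1]
    have h2 := outer_bridge lista y n lista rfl (by omega)
    rw [h] at h2 ⊢
    simpa using h2

-- ---- canon (maypaim_alt) facts ----

theorem alt_nil (y : Int) : maypaim_alt [] y = [] := by rw [maypaim_alt]

theorem alt_cons (y x : Int) (xs : List Int) :
    maypaim_alt (x :: xs) y =
      PySem.List.sorted (x :: xs.takeWhile (fun z => decide (pvKey y z = pvKey y x))) (fun v => v)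
        (decide (PySem.Int.mod x 2 = 1))
      ++ maypaim_alt (xs.dropWhile (fun z => decide (pvKey y z = pvKey y x))) y := by
  rw [maypaim_alt]

-- permutation invariance of Python's sorted, identity key, either direction
theorem sorted_perm_eq (flag : Bool) (xs ys : List Int) (h : xs.Perm ys) :
    PySem.List.sorted xs (fun v => v) flag = PySem.List.sorted ys (fun v => v) flag := by
  have hp : (PySem.List.sorted xs (fun v => v) flag).Perm (PySem.List.sorted ys (fun v => v) flag) :=
    ((PySem.List.sorted_perm xs _ _).trans h).trans (PySem.List.sorted_perm ys _ _).symm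
  cases flag with
  | false =>
    exact List.Perm.eq_of_pairwise (le := fun a b : Int => a ≤ b)
      (fun a b _ _ h1 h2 => le_antisymm h1 h2)
      (PySem.List.sorted_pairwise xs (fun v => v)) (PySem.List.sorted_pairwise ys (fun v => v)) hp
  | true =>
    exact List.Perm.eq_of_pairwise (le := fun a b : Int => b ≤ a)
      (fun a b _ _ h1 h2 => le_antisymm h2 h1)
      (PySem.List.sorted_pairwise_rev xs (fun v => v)) (PySem.List.sorted_pairwise_rev ys (fun v => v)) hp

theorem sorted_singleton (flag : Bool) (c : Int) : PySem.List.sorted [c] (fun v => v) flag = [c] := by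
  cases flag with
  | false => exact PySem.List.sorted_eq_self_of_pairwise [c] (fun v => v) (List.pairwise_singleton _ _)
  | true => exact PySem.List.sorted_rev_eq_self_of_pairwise [c] (fun v => v) (List.pairwise_singleton _ _)

theorem alt_singleton (y c : Int) : maypaim_alt [c] y = [c] := by
  rw [alt_cons]
  simp only [List.takeWhile_nil, List.dropWhile_nil, alt_nil, List.append_nil]
  exact sorted_singleton _ c

theorem sorted_append_extreme (flag : Bool) (r : List Int) (c : Int)
    (h : ∀ x ∈ r, if flag then c ≤ x else x ≤ c) :
    PySem.List.sorted (r ++ [c]) (fun v => v) flag = PySem.List.sorted r (fun v => v) flag ++ [c] := by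
  have hperm : (PySem.List.sorted (r ++ [c]) (fun v => v) flag).Perm
      (PySem.List.sorted r (fun v => v) flag ++ [c]) :=
    (PySem.List.sorted_perm (r ++ [c]) _ _).trans
      (((PySem.List.sorted_perm r _ _).append (List.Perm.refl [c])).symm)
  cases flag with
  | false =>
    refine List.Perm.eq_of_pairwise (le := fun a b : Int => a ≤ b)
      (fun a b _ _ h1 h2 => le_antisymm h1 h2)
      (PySem.List.sorted_pairwise (r ++ [c]) (fun v => v)) ?_ hperm
    rw [List.pairwise_append]
    refine ⟨PySem.List.sorted_pairwise r (fun v => v), List.pairwise_singleton _ _, ?_⟩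
    intro x hx c' hc'
    simp at hc'; subst hc'
    simpa using h x ((PySem.List.mem_sorted r (fun v => v) false x).mp hx)
  | true =>
    refine List.Perm.eq_of_pairwise (le := fun a b : Int => b ≤ a)
      (fun a b _ _ h1 h2 => le_antisymm h2 h1)
      (PySem.List.sorted_pairwise_rev (r ++ [c]) (fun v => v)) ?_ hperm
    rw [List.pairwise_append]
    refine ⟨PySem.List.sorted_pairwise_rev r (fun v => v), List.pairwise_singleton _ _, ?_⟩
    intro x hx c' hc'
    simp at hc'; subst hc'
    simpa using h x ((PySem.List.mem_sorted r (fun v => v) true x).mp hx)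

-- membership in takeWhile is monotone under list-prefix extension
theorem mem_takeWhile_of_prefix (f : Int → Bool) :
    ∀ (p q : List Int), p <+: q → ∀ x ∈ p.takeWhile f, x ∈ q.takeWhile f := by
  intro p
  induction p with
  | nil => intro q _ x hx; simp at hx
  | cons a p' ih =>
    intro q hpq x hx
    obtain ⟨s, rfl⟩ := hpq
    by_cases hfa : f a
    · rw [List.takeWhile_cons_of_pos hfa] at hx
      rw [List.cons_append, List.takeWhile_cons_of_pos hfa]
      rcases List.mem_cons.mp hx with rfl | hx'
      · exact List.mem_cons_self
      · exact List.mem_cons_of_mem _ (ih (p' ++ s) ⟨s, rfl⟩ x hx')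
    · rw [List.takeWhile_cons_of_neg hfa] at hx
      simp at hx

-- span of a list with two equal-key adjacent elements transposed
theorem spanswap (f : Int → Bool) (p q : Int) (hf : f p = f q) :
    ∀ (pre t : List Int),
      ((pre ++ p :: q :: t).takeWhile f).Perm ((pre ++ q :: p :: t).takeWhile f)
        ∧ (pre ++ p :: q :: t).dropWhile f = (pre ++ q :: p :: t).dropWhile f
      ∨ (pre ++ p :: q :: t).takeWhile f = (pre ++ q :: p :: t).takeWhile f
        ∧ ∃ pre₂ : List Int, (pre ++ p :: q :: t).dropWhile f = pre₂ ++ p :: q :: t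
            ∧ (pre ++ q :: p :: t).dropWhile f = pre₂ ++ q :: p :: t := by
  intro pre
  induction pre with
  | nil =>
    intro t
    by_cases hp : f p
    · have hq : f q = true := by rw [← hf]; exact hp
      left
      constructor
      · simp only [List.nil_append, List.takeWhile_cons_of_pos hp, List.takeWhile_cons_of_pos hq]
        exact List.Perm.swap q p _
      · simp only [List.nil_append, List.dropWhile_cons_of_pos hp, List.dropWhile_cons_of_pos hq]
    · have hq : ¬ (f q = true) := by rw [← hf]; exact hp
      right
      constructor
      · simp only [List.nil_append, List.takeWhile_cons_of_neg hp, List.takeWhile_cons_of_neg hq]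
      · exact ⟨[], by simp [List.dropWhile_cons_of_neg hp, List.dropWhile_cons_of_neg hq]⟩
  | cons z pre' ih =>
    intro t
    by_cases hz : f z
    · rcases ih t with ⟨htw, hdw⟩ | ⟨htw, pre₂, hd1, hd2⟩
      · left
        constructor
        · simp only [List.cons_append, List.takeWhile_cons_of_pos hz]
          exact htw.cons z
        · simp only [List.cons_append, List.dropWhile_cons_of_pos hz, hdw]
      · right
        refine ⟨?_, pre₂, ?_, ?_⟩
        · simp only [List.cons_append, List.takeWhile_cons_of_pos hz, htw]
        · simp only [List.cons_append, List.dropWhile_cons_of_pos hz, hd1]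
        · simp only [List.cons_append, List.dropWhile_cons_of_pos hz, hd2]
    · right
      refine ⟨?_, z :: pre', ?_, ?_⟩
      · simp only [List.cons_append, List.takeWhile_cons_of_neg hz]
      · simp only [List.cons_append, List.dropWhile_cons_of_neg hz]
      · simp only [List.cons_append, List.dropWhile_cons_of_neg hz]

theorem key_parity (y p q : Int) (h : pvKey y p = pvKey y q) : PySem.Int.mod p 2 = PySem.Int.mod q 2 := by
  simpa [pvKey] using congrArg Prod.snd h

-- canon is invariant under transposing two adjacent equal-key elements
theorem canon_adjswap (y p q : Int) (hk : pvKey y p = pvKey y q) :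
    ∀ (n : Nat) (pre : List Int), pre.length ≤ n → ∀ (t : List Int),
      maypaim_alt (pre ++ p :: q :: t) y = maypaim_alt (pre ++ q :: p :: t) y := by
  intro n
  induction n with
  | zero =>
    intro pre hpre t
    have h0 : pre = [] := List.length_eq_zero_iff.mp (by omega)
    subst h0
    simp only [List.nil_append]
    rw [alt_cons, alt_cons]
    have hfun : (fun z => decide (pvKey y z = pvKey y p)) = (fun z => decide (pvKey y z = pvKey y q)) := by
      funext z; simp [hk]
    rw [hfun, key_parity y p q hk]
    rw [List.takeWhile_cons_of_pos (by simp), List.takeWhile_cons_of_pos (by simp [hk]),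
        List.dropWhile_cons_of_pos (by simp), List.dropWhile_cons_of_pos (by simp [hk])]
    congr 1
    exact sorted_perm_eq _ _ _ (List.Perm.swap q p _)
  | succ n ih =>
    intro pre hpre t
    match pre with
    | [] => exact ih [] (by simp) t
    | z :: pre' =>
      simp only [List.cons_append]
      rw [alt_cons, alt_cons]
      rcases spanswap (fun w => decide (pvKey y w = pvKey y z)) p q (by simp [hk]) pre' t with
        ⟨htw, hdw⟩ | ⟨htw, pre₂, hd1, hd2⟩
      · rw [hdw]
        congr 1
        exact sorted_perm_eq _ _ _ (htw.cons z)
      · rw [htw, hd1, hd2]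
        congr 1
        have hlen : pre₂.length ≤ n := by
          have h1 : (pre₂ ++ p :: q :: t).length ≤ (pre' ++ p :: q :: t).length := by
            rw [← hd1]; exact List.length_dropWhile_le _ _
          simp at h1 hpre
          omega
        exact ih pre₂ hlen t

-- appending an element that is extreme for the trailing equal-key run is final
theorem canon_final (y c : Int) :
    ∀ (n : Nat) (w : List Int), w.length ≤ n →
      (∀ x ∈ w.reverse.takeWhile (fun z => decide (pvKey y z = pvKey y c)), pvExt c x) →
      maypaim_alt (w ++ [c]) y = maypaim_alt w y ++ [c] := by
  intro n
  induction n with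
  | zero =>
    intro w hw _
    have h0 : w = [] := List.length_eq_zero_iff.mp (by omega)
    subst h0
    rw [List.nil_append, alt_nil, alt_singleton, List.nil_append]
  | succ n ih =>
    intro w hw hext
    match w with
    | [] => rw [List.nil_append, alt_nil, alt_singleton, List.nil_append]
    | z :: w' =>
      rw [List.cons_append, alt_cons, alt_cons]
      by_cases hall : ∀ x ∈ w', (fun v => decide (pvKey y v = pvKey y z)) x = true
      · have htww : w'.takeWhile (fun v => decide (pvKey y v = pvKey y z)) = w' :=
          List.takeWhile_eq_self_iff.mpr hall
        have hdww : w'.dropWhile (fun v => decide (pvKey y v = pvKey y z)) = [] :=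
          List.dropWhile_eq_nil_iff.mpr hall
        by_cases hc : (pvKey y c = pvKey y z)
        · -- c joins the run: everything is one run, c is extreme in it
          have htw2 : (w' ++ [c]).takeWhile (fun v => decide (pvKey y v = pvKey y z)) = w' ++ [c] :=
            List.takeWhile_eq_self_iff.mpr (by
              intro x hx
              rcases List.mem_append.mp hx with hx | hx
              · exact hall x hx
              · simp at hx; rw [hx]; simp [hc])
          have hdw2 : (w' ++ [c]).dropWhile (fun v => decide (pvKey y v = pvKey y z)) = [] :=
            List.dropWhile_eq_nil_iff.mpr (by
              intro x hx
              rcases List.mem_append.mp hx with hx | hx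
              · exact hall x hx
              · simp at hx; rw [hx]; simp [hc])
          rw [htw2, hdw2, htww, hdww, alt_nil, List.append_nil, List.append_nil]
          have hpar : PySem.Int.mod c 2 = PySem.Int.mod z 2 := key_parity y c z hc
          have hextall : ∀ x ∈ z :: w', pvExt c x := by
            intro x hx
            apply hext
            have hrev : x ∈ (z :: w').reverse := List.mem_reverse.mpr hx
            have hallrev : ∀ v ∈ (z :: w').reverse, (fun u => decide (pvKey y u = pvKey y c)) v = true := by
              intro v hv
              have hv' : v ∈ z :: w' := List.mem_reverse.mp hv
              rcases List.mem_cons.mp hv' with rfl | hv''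
              · simp [hc]
              · have hvk := hall v hv''
                simp only [decide_eq_true_eq] at hvk
                simp [hvk, hc]
            rw [List.takeWhile_eq_self_iff.mpr hallrev]
            exact hrev
          have hsa := sorted_append_extreme (decide (PySem.Int.mod z 2 = 1)) (z :: w') c (by
            intro x hx
            have hx' := hextall x hx
            unfold pvExt at hx'
            rcases PySem.Int.mod_two_eq z with hz0 | hz1
            · have hc0 : PySem.Int.mod c 2 = 0 := by omega
              rw [hc0] at hx'
              simp only [hz0] at hx' ⊢
              simpa using hx'
            · have hc1 : PySem.Int.mod c 2 = 1 := by omega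
              rw [hc1] at hx'
              simp only [hz1] at hx' ⊢
              simpa using hx')
          rw [show z :: (w' ++ [c]) = (z :: w') ++ [c] by simp, hsa]
        · -- c starts a new run of its own
          have htw2 : (w' ++ [c]).takeWhile (fun v => decide (pvKey y v = pvKey y z)) = w' := by
            rw [List.takeWhile_append, if_pos (by rw [htww]), List.takeWhile_cons_of_neg (by simp [hc]),
                List.append_nil]
          have hdw2 : (w' ++ [c]).dropWhile (fun v => decide (pvKey y v = pvKey y z)) = [c] := by
            rw [List.dropWhile_append, if_pos (by simp [hdww]), List.dropWhile_cons_of_neg (by simp [hc])]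
          rw [htw2, hdw2, htww, hdww, alt_nil, List.append_nil, alt_singleton]
      · -- the first run ends inside w'; recurse on the dropped suffix
        have hne : w'.dropWhile (fun v => decide (pvKey y v = pvKey y z)) ≠ [] := by
          intro hnil
          exact hall (List.dropWhile_eq_nil_iff.mp hnil)
        have htwne : (w'.takeWhile (fun v => decide (pvKey y v = pvKey y z))).length ≠ w'.length := by
          intro hlen
          exact hall (List.takeWhile_eq_self_iff.mp
            ((List.takeWhile_prefix _).eq_of_length hlen))
        have htw2 : (w' ++ [c]).takeWhile (fun v => decide (pvKey y v = pvKey y z))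
            = w'.takeWhile (fun v => decide (pvKey y v = pvKey y z)) := by
          rw [List.takeWhile_append, if_neg htwne]
        have hdw2 : (w' ++ [c]).dropWhile (fun v => decide (pvKey y v = pvKey y z))
            = w'.dropWhile (fun v => decide (pvKey y v = pvKey y z)) ++ [c] := by
          rw [List.dropWhile_append, if_neg (by simpa [List.isEmpty_iff] using hne)]
        rw [htw2, hdw2]
        have hrec : maypaim_alt (w'.dropWhile (fun v => decide (pvKey y v = pvKey y z)) ++ [c]) y
            = maypaim_alt (w'.dropWhile (fun v => decide (pvKey y v = pvKey y z))) y ++ [c] := by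
          apply ih
          · have hld := List.length_dropWhile_le (fun v => decide (pvKey y v = pvKey y z)) w'
            simp at hw
            omega
          · intro x hx
            apply hext
            have hpref : (w'.dropWhile (fun v => decide (pvKey y v = pvKey y z))).reverse
                <+: (z :: w').reverse := by
              obtain ⟨u, hu⟩ : ∃ u, w' = u ++ w'.dropWhile (fun v => decide (pvKey y v = pvKey y z)) :=
                ⟨w'.takeWhile _, (List.takeWhile_append_dropWhile).symm⟩
              rw [show z :: w' = (z :: u) ++ w'.dropWhile (fun v => decide (pvKey y v = pvKey y z))
                    by simp [← hu], List.reverse_append]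
              exact ⟨(z :: u).reverse, rfl⟩
            exact mem_takeWhile_of_prefix _ _ _ hpref x hx
        rw [hrec, List.append_assoc]

-- tpass preserves canon (each swap transposes an equal-key adjacent pair)
theorem tpass_canon (y : Int) : ∀ (k : Nat) (l pre : List Int),
    maypaim_alt (pre ++ tpass y k l) y = maypaim_alt (pre ++ l) y := by
  intro k
  induction k with
  | zero => intro l pre; rfl
  | succ k ih =>
    intro l pre
    match l with
    | [] => rfl
    | [a] => rfl
    | a :: b :: t =>
      simp only [tpass]
      split_ifs with h1 h2
      · have hk : pvKey y a = pvKey y b := by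
          unfold pvKey; rw [h1.2.1, h1.2.2.1, h1.2.2.2]
        rw [show pre ++ b :: tpass y k (a :: t) = (pre ++ [b]) ++ tpass y k (a :: t) by simp,
            ih (a :: t) (pre ++ [b])]
        rw [show (pre ++ [b]) ++ a :: t = pre ++ b :: a :: t by simp]
        exact canon_adjswap y b a hk.symm pre.length pre (le_refl _) t
      · have hk : pvKey y a = pvKey y b := by
          unfold pvKey; rw [h2.2.1, h2.2.2.1, h2.2.2.2]
        rw [show pre ++ b :: tpass y k (a :: t) = (pre ++ [b]) ++ tpass y k (a :: t) by simp,
            ih (a :: t) (pre ++ [b])]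
        rw [show (pre ++ [b]) ++ a :: t = pre ++ b :: a :: t by simp]
        exact canon_adjswap y b a hk.symm pre.length pre (le_refl _) t
      · rw [show pre ++ a :: tpass y k (b :: t) = (pre ++ [a]) ++ tpass y k (b :: t) by simp,
            ih (b :: t) (pre ++ [a])]
        simp

-- the full-pass lemma: one pass over a :: t ends with an element extreme for its trailing run
theorem pass_lemma (y : Int) : ∀ (t : List Int) (a : Int), ∃ (u : List Int) (c : Int),
    tpass y t.length (a :: t) = u ++ [c]
    ∧ pvKey y ((u ++ [c]).headI) = pvKey y a
    ∧ u.length = t.length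
    ∧ ∀ x ∈ u.reverse.takeWhile (fun z => decide (pvKey y z = pvKey y c)), pvExt c x := by
  intro t
  induction t with
  | nil =>
    intro a
    exact ⟨[], a, rfl, by simp, rfl, by simp⟩
  | cons b t' ih =>
    intro a
    simp only [List.length_cons, tpass]
    by_cases h1 : a < b ∧ PySem.Int.mod a y = PySem.Int.mod b y ∧ PySem.Int.mod a 2 = 1 ∧ PySem.Int.mod b 2 = 1
    · -- odd swap: b stays, a is carried
      obtain ⟨u', c', hsp, hhead, hlen, hext⟩ := ih a
      rw [if_pos h1, hsp]
      have hkab : pvKey y a = pvKey y b := by unfold pvKey; rw [h1.2.1, h1.2.2.1, h1.2.2.2]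
      refine ⟨b :: u', c', by simp, by simpa using hkab.symm, by simpa using hlen, ?_⟩
      intro x hx
      rw [show (b :: u').reverse = u'.reverse ++ [b] by simp] at hx
      by_cases hflen : ((u'.reverse.takeWhile (fun z => decide (pvKey y z = pvKey y c'))).length = u'.reverse.length)
      · have htwu : u'.reverse.takeWhile (fun z => decide (pvKey y z = pvKey y c')) = u'.reverse :=
          (List.takeWhile_prefix _).eq_of_length hflen
        rw [List.takeWhile_append, if_pos hflen] at hx
        rcases List.mem_append.mp hx with hx | hx
        · exact hext x (by rw [htwu]; exact hx)
        · by_cases hfb : (pvKey y b = pvKey y c')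
          · rw [List.takeWhile_cons_of_pos (by simp [hfb])] at hx
            simp at hx; rw [hx]
            -- x = b; need pvExt c' b; parity of c' is parity of b = 1
            have hpar : PySem.Int.mod c' 2 = 1 := by
              have := key_parity y b c' hfb; omega
            unfold pvExt
            rw [hpar, if_pos rfl]
            -- a ∈ u' ++ [c'] via tpass_perm
            have hmem : a ∈ u' ++ [c'] := by
              rw [← hsp]
              exact ((tpass_perm y t'.length (a :: t')).mem_iff).mpr List.mem_cons_self
            rcases List.mem_append.mp hmem with hmem | hmem
            · have hpe := hext a (by
                rw [htwu]
                simpa using hmem)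
              unfold pvExt at hpe
              rw [hpar, if_pos rfl] at hpe
              omega
            · simp at hmem; subst hmem
              omega
          · rw [List.takeWhile_cons_of_neg (by simp [hfb])] at hx
            simp at hx
      · rw [List.takeWhile_append, if_neg hflen] at hx
        exact hext x hx
    · rw [if_neg h1]
      by_cases h2 : a > b ∧ PySem.Int.mod a y = PySem.Int.mod b y ∧ PySem.Int.mod a 2 = 0 ∧ PySem.Int.mod b 2 = 0
      · -- even swap: b stays, a is carried
        obtain ⟨u', c', hsp, hhead, hlen, hext⟩ := ih a
        rw [if_pos h2, hsp]
        have hkab : pvKey y a = pvKey y b := by unfold pvKey; rw [h2.2.1, h2.2.2.1, h2.2.2.2]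
        refine ⟨b :: u', c', by simp, by simpa using hkab.symm, by simpa using hlen, ?_⟩
        intro x hx
        rw [show (b :: u').reverse = u'.reverse ++ [b] by simp] at hx
        by_cases hflen : ((u'.reverse.takeWhile (fun z => decide (pvKey y z = pvKey y c'))).length = u'.reverse.length)
        · have htwu : u'.reverse.takeWhile (fun z => decide (pvKey y z = pvKey y c')) = u'.reverse :=
            (List.takeWhile_prefix _).eq_of_length hflen
          rw [List.takeWhile_append, if_pos hflen] at hx
          rcases List.mem_append.mp hx with hx | hx
          · exact hext x (by rw [htwu]; exact hx)
          · by_cases hfb : (pvKey y b = pvKey y c')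
            · rw [List.takeWhile_cons_of_pos (by simp [hfb])] at hx
              simp at hx; rw [hx]
              have hpar : PySem.Int.mod c' 2 = 0 := by
                have := key_parity y b c' hfb; omega
              unfold pvExt
              rw [hpar]
              simp only [if_neg (by omega : ¬ ((0:Int) = 1))]
              have hmem : a ∈ u' ++ [c'] := by
                rw [← hsp]
                exact ((tpass_perm y t'.length (a :: t')).mem_iff).mpr List.mem_cons_self
              rcases List.mem_append.mp hmem with hmem | hmem
              · have hpe := hext a (by
                  rw [htwu]
                  simpa using hmem)
                unfold pvExt at hpe
                rw [hpar] at hpe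
                simp only [if_neg (by omega : ¬ ((0:Int) = 1))] at hpe
                omega
              · simp at hmem; subst hmem
                omega
            · rw [List.takeWhile_cons_of_neg (by simp [hfb])] at hx
              simp at hx
        · rw [List.takeWhile_append, if_neg hflen] at hx
          exact hext x hx
      · -- no swap: a stays, b is carried
        obtain ⟨u', c', hsp, hhead, hlen, hext⟩ := ih b
        rw [if_neg h2, hsp]
        refine ⟨a :: u', c', by simp, by simp, by simpa using hlen, ?_⟩
        intro x hx
        rw [show (a :: u').reverse = u'.reverse ++ [a] by simp] at hx
        by_cases hflen : ((u'.reverse.takeWhile (fun z => decide (pvKey y z = pvKey y c'))).length = u'.reverse.length)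
        · have htwu : u'.reverse.takeWhile (fun z => decide (pvKey y z = pvKey y c')) = u'.reverse :=
            (List.takeWhile_prefix _).eq_of_length hflen
          rw [List.takeWhile_append, if_pos hflen] at hx
          rcases List.mem_append.mp hx with hx | hx
          · exact hext x (by rw [htwu]; exact hx)
          · by_cases hfa : (pvKey y a = pvKey y c')
            · rw [List.takeWhile_cons_of_pos (by simp [hfa])] at hx
              simp at hx; rw [hx]
              -- x = a; show pvExt c' a
              by_cases hkab : pvKey y a = pvKey y b
              · -- same key: use b (the carried element) to bound a
                have hmem : b ∈ u' ++ [c'] := by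
                  rw [← hsp]
                  exact ((tpass_perm y t'.length (b :: t')).mem_iff).mpr List.mem_cons_self
                have hpab : PySem.Int.mod a 2 = PySem.Int.mod b 2 := key_parity y a b hkab
                have hpac : PySem.Int.mod a 2 = PySem.Int.mod c' 2 := key_parity y a c' hfa
                have hkeq : PySem.Int.mod a y = PySem.Int.mod b y := by
                  have := congrArg Prod.fst hkab; simpa [pvKey] using this
                rcases PySem.Int.mod_two_eq a with ha0 | ha1
                · -- even: ¬(a > b) so a ≤ b; b ≤ c'
                  have hab : a ≤ b := by
                    by_contra hgt
                    exact h2 ⟨by omega, hkeq, ha0, by omega⟩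
                  have hbc : b ≤ c' := by
                    rcases List.mem_append.mp hmem with hmem | hmem
                    · have hpe := hext b (by rw [htwu]; simpa using hmem)
                      unfold pvExt at hpe
                      rw [← hpac, ha0] at hpe
                      simp only [if_neg (by omega : ¬ ((0:Int) = 1))] at hpe
                      omega
                    · simp at hmem; omega
                  unfold pvExt
                  rw [← hpac, ha0]
                  simp only [if_neg (by omega : ¬ ((0:Int) = 1))]
                  omega
                · -- odd: ¬(a < b) so b ≤ a; c' ≤ b
                  have hab : b ≤ a := by
                    by_contra hlt
                    exact h1 ⟨by omega, hkeq, ha1, by omega⟩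
                  have hbc : c' ≤ b := by
                    rcases List.mem_append.mp hmem with hmem | hmem
                    · have hpe := hext b (by rw [htwu]; simpa using hmem)
                      unfold pvExt at hpe
                      rw [← hpac, ha1] at hpe
                      norm_num at hpe
                      omega
                    · simp at hmem; omega
                  unfold pvExt
                  rw [← hpac, ha1]
                  norm_num
                  omega
              · -- different keys: impossible, since then key c' = key b ≠ key a = key c'
                exfalso
                match u', hlen, htwu with
                | [], hlen, _ =>
                  have ht'nil : t' = [] := List.length_eq_zero_iff.mp (by simpa using hlen.symm)
                  subst ht'nil
                  have : ([] : List Int) ++ [c'] = [b] := by rw [← hsp]; rfl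
                  simp at this
                  subst this
                  exact hkab hfa
                | v :: u'', hlen, htwu =>
                  have hvmem : v ∈ (v :: u'').reverse := by simp
                  have hvk := hext v (by rw [htwu]; exact hvmem)
                  -- v's key equals c''s key since all of u'.reverse passed takeWhile
                  have hvkey : pvKey y v = pvKey y c' := by
                    have hvtw : v ∈ (v :: u'').reverse.takeWhile
                        (fun z => decide (pvKey y z = pvKey y c')) := by rw [htwu]; exact hvmem
                    have := List.mem_takeWhile_imp hvtw
                    simpa using this
                  -- head of u' ++ [c'] is v, whose key is key b by IH head clause
                  have hhv : pvKey y v = pvKey y b := by simpa using hhead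
                  exact hkab (by rw [hfa, ← hvkey, hhv])
            · rw [List.takeWhile_cons_of_neg (by simp [hfa])] at hx
              simp at hx
        · rw [List.takeWhile_append, if_neg hflen] at hx
          exact hext x hx

-- the main induction: the shrinking passes reach the canonical form
theorem main_lemma (y : Int) : ∀ (m : Nat) (l : List Int), l.length ≤ m + 1 →
    sweep y m l = maypaim_alt l y := by
  intro m
  induction m with
  | zero =>
    intro l hl
    match l, hl with
    | [], _ => rw [alt_nil]; rfl
    | [x], _ => rw [alt_singleton]; rfl
  | succ m ih =>
    intro l hl
    simp only [sweep]
    by_cases hsm : l.length ≤ m + 1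
    · rw [ih (tpass y (m + 1) l) (by rw [length_tpass]; exact hsm)]
      have h3 := tpass_canon y (m + 1) l []
      simpa using h3
    · have hlen : l.length = m + 2 := by omega
      match l, hlen with
      | a :: t, hlen =>
        have ht : t.length = m + 1 := by simp at hlen; omega
        obtain ⟨u, c, hsplit, _, hulen, hext⟩ := pass_lemma y t a
        rw [show tpass y (m + 1) (a :: t) = tpass y t.length (a :: t) by rw [ht], hsplit]
        rw [sweep_append y m u c (by omega)]
        rw [ih u (by omega)]
        have h1 : maypaim_alt (a :: t) y = maypaim_alt (u ++ [c]) y := by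
          have h0 := tpass_canon y t.length (a :: t) []
          simp only [List.nil_append] at h0
          rw [← h0, hsplit]
        have h2 : maypaim_alt (u ++ [c]) y = maypaim_alt u y ++ [c] :=
          canon_final y c u.length u (le_refl _) hext
        rw [← h2, ← h1]

-- ===== VERDICT (by name: the statement is the Claim_ definition above) =====
theorem maypaim_spec : Claim_equal_maypaim := by
  intro lista y _ _
  unfold Spec_maypaim
  rw [maypaim_eq_sweep]
  exact main_lemma y (lista.length - 1) lista (by omega)
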